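-- pv_equiv track=rewrite | github.com/BaraniVA/Zeroinput | agent/suggestion_engine.py | get_context_category
-- ===== SOURCE A (Python) =====
-- def get_context_category(window_title, processes):
--     """Determine the general category of work being done"""
--     window_lower = window_title.lower()
--
--     # Check for common applications in window title or processes
--     if "gmail" in window_lower or "mail.google" in window_lower:
--         return "email"
--     elif "docs.google" in window_lower:
--         return "document"
--     elif "slides.google" in window_lower:
--         return "presentation"
--     elif "sheets.google" in window_lower:
--         return "spreadsheet"
--     elif "youtube" in window_lower:
--         return "video"
--     elif "canva" in window_lower:
--         return "canva"
--     elif "visual studio code" in window_lower or "vs code" in window_lower or "code.exe" in [p.lower() for p in processes]: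
--         return "code"
--     elif "word" in window_lower or "document" in window_lower or ".doc" in window_lower:
--         return "document"
--     elif "powerpoint" in window_lower or "presentation" in window_lower or ".ppt" in window_lower:
--         return "presentation"
--     elif "outlook" in window_lower or "mail" in window_lower or "gmail" in window_lower:
--         return "email"
--     elif "chrome" in window_lower or "edge" in window_lower or "firefox" in window_lower or "browser" in window_lower:
--         return "browser"
--     elif "premiere" in window_lower or "video" in window_lower or "youtube" in window_lower:
--         return "video"
--
--     # Check processes for clues
--     for process in processes:
--         process_lower = process.lower()
--         if "canva" in process_lower:
--             return "canva"
--         elif "code" in process_lower or "visual studio" in process_lower: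
--             return "code"
--         elif "word" in process_lower:
--             return "document"
--         elif "powerpoint" in process_lower:
--             return "presentation"
--         elif "outlook" in process_lower or "thunderbird" in process_lower:
--             return "email"
--         elif "chrome" in process_lower or "firefox" in process_lower or "edge" in process_lower:
--             return "browser"
--         elif "premiere" in process_lower or "vegas" in process_lower or "video" in process_lower:
--             return "video"
--
--     return "default"
-- ===== SOURCE B (Python) =====
-- # Different algorithm: one left-to-right positional scan of the text collects the set of
-- # ALL keywords occurring in it (naive multi-pattern matching), then priority resolution is
-- # pure set-intersection against the rule table -- no chain of substring tests.
--
-- TITLE_KEYWORDS = [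
--     "gmail", "mail.google", "docs.google", "slides.google", "sheets.google",
--     "youtube", "canva", "visual studio code", "vs code", "word", "document",
--     ".doc", "powerpoint", "presentation", ".ppt", "outlook", "mail",
--     "chrome", "edge", "firefox", "browser", "premiere", "video",
-- ]
--
-- TITLE_RULES = [
--     ("email", frozenset(["gmail", "mail.google"])),
--     ("document", frozenset(["docs.google"])),
--     ("presentation", frozenset(["slides.google"])),
--     ("spreadsheet", frozenset(["sheets.google"])),
--     ("video", frozenset(["youtube"])),
--     ("canva", frozenset(["canva"])),
--     ("code", frozenset(["visual studio code", "vs code", "code.exe"])),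
--     ("document", frozenset(["word", "document", ".doc"])),
--     ("presentation", frozenset(["powerpoint", "presentation", ".ppt"])),
--     ("email", frozenset(["outlook", "mail", "gmail"])),
--     ("browser", frozenset(["chrome", "edge", "firefox", "browser"])),
--     ("video", frozenset(["premiere", "video", "youtube"])),
-- ]
--
-- PROC_KEYWORDS = [
--     "canva", "code", "visual studio", "word", "powerpoint", "outlook",
--     "thunderbird", "chrome", "firefox", "edge", "premiere", "vegas", "video",
-- ]
--
-- PROC_RULES = [
--     ("canva", frozenset(["canva"])),
--     ("code", frozenset(["code", "visual studio"])),
--     ("document", frozenset(["word"])),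
--     ("presentation", frozenset(["powerpoint"])),
--     ("email", frozenset(["outlook", "thunderbird"])),
--     ("browser", frozenset(["chrome", "firefox", "edge"])),
--     ("video", frozenset(["premiere", "vegas", "video"])),
-- ]
--
--
-- def _scan(text, keywords):
--     """One pass over text: the set of keywords that occur somewhere in it."""
--     hits = set()
--     for i in range(len(text)):
--         for kw in keywords:
--             if kw not in hits and text.startswith(kw, i):
--                 hits.add(kw)
--     return hits
--
--
-- def get_context_category(window_title, processes):
--     """Determine the general category of work being done"""
--     hits = _scan(window_title.lower(), TITLE_KEYWORDS)
--     if "code.exe" in (p.lower() for p in processes):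
--         hits.add("code.exe")
--     for category, keys in TITLE_RULES:
--         if hits & keys:
--             return category
--     for process in processes:
--         phits = _scan(process.lower(), PROC_KEYWORDS)
--         for category, keys in PROC_RULES:
--             if phits & keys:
--                 return category
--     return "default"
-- ===== Notes on version B (the rewrite author's own statement) =====
-- stated objective: alternative
-- what changed: Replaces the chains of per-rule substring tests by a naive multi-pattern matcher: one positional scan of the lowered text collects the set of all keywords occurring in it, then the category is resolved purely by set-intersection against an ordered rule table.
import Mathlib
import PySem

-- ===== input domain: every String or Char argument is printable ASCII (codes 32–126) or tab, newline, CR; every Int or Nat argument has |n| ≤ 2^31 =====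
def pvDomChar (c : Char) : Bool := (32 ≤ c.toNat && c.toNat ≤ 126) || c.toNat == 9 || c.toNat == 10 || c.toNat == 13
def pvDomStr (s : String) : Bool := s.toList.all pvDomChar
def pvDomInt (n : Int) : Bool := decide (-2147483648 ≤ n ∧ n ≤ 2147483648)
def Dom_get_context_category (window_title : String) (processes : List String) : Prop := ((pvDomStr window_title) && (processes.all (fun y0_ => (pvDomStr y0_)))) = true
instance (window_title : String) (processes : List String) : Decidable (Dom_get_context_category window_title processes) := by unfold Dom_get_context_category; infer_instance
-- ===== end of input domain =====

-- B replaces A's two chains of substring tests by a single positional scan collecting the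
-- set of all matched keywords, resolved by set-intersection against ordered rule tables
-- (objective: alternative algorithm, same asymptotic cost).


-- ===== PORT A =====
-- the trailing 'for process in processes' loop of A
def aProcLoop : List String → String
  | [] => "default"
  | process :: rest =>
    let pl := PySem.Str.lower process
    if PySem.Str.isIn "canva" pl then "canva"
    else if PySem.Str.isIn "code" pl || PySem.Str.isIn "visual studio" pl then "code"
    else if PySem.Str.isIn "word" pl then "document"
    else if PySem.Str.isIn "powerpoint" pl then "presentation"
    else if PySem.Str.isIn "outlook" pl || PySem.Str.isIn "thunderbird" pl then "email"
    else if PySem.Str.isIn "chrome" pl || PySem.Str.isIn "firefox" pl || PySem.Str.isIn "edge" pl then "browser"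
    else if PySem.Str.isIn "premiere" pl || PySem.Str.isIn "vegas" pl || PySem.Str.isIn "video" pl then "video"
    else aProcLoop rest

def get_context_category (window_title : String) (processes : List String) : String :=
  let wl := PySem.Str.lower window_title
  if PySem.Str.isIn "gmail" wl || PySem.Str.isIn "mail.google" wl then "email"
  else if PySem.Str.isIn "docs.google" wl then "document"
  else if PySem.Str.isIn "slides.google" wl then "presentation"
  else if PySem.Str.isIn "sheets.google" wl then "spreadsheet"
  else if PySem.Str.isIn "youtube" wl then "video"
  else if PySem.Str.isIn "canva" wl then "canva"
  else if PySem.Str.isIn "visual studio code" wl || PySem.Str.isIn "vs code" wl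
       || (processes.map (fun p => PySem.Str.lower p)).contains "code.exe" then "code"
  else if PySem.Str.isIn "word" wl || PySem.Str.isIn "document" wl || PySem.Str.isIn ".doc" wl then "document"
  else if PySem.Str.isIn "powerpoint" wl || PySem.Str.isIn "presentation" wl || PySem.Str.isIn ".ppt" wl then "presentation"
  else if PySem.Str.isIn "outlook" wl || PySem.Str.isIn "mail" wl || PySem.Str.isIn "gmail" wl then "email"
  else if PySem.Str.isIn "chrome" wl || PySem.Str.isIn "edge" wl || PySem.Str.isIn "firefox" wl || PySem.Str.isIn "browser" wl then "browser"
  else if PySem.Str.isIn "premiere" wl || PySem.Str.isIn "video" wl || PySem.Str.isIn "youtube" wl then "video"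
  else aProcLoop processes

-- ===== PORT B =====
def titleKeywords : List String :=
  ["gmail", "mail.google", "docs.google", "slides.google", "sheets.google",
   "youtube", "canva", "visual studio code", "vs code", "word", "document",
   ".doc", "powerpoint", "presentation", ".ppt", "outlook", "mail",
   "chrome", "edge", "firefox", "browser", "premiere", "video"]

def titleRules : List (String × List String) :=
  [("email", ["gmail", "mail.google"]),
   ("document", ["docs.google"]),
   ("presentation", ["slides.google"]),
   ("spreadsheet", ["sheets.google"]),
   ("video", ["youtube"]),
   ("canva", ["canva"]),
   ("code", ["visual studio code", "vs code", "code.exe"]),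
   ("document", ["word", "document", ".doc"]),
   ("presentation", ["powerpoint", "presentation", ".ppt"]),
   ("email", ["outlook", "mail", "gmail"]),
   ("browser", ["chrome", "edge", "firefox", "browser"]),
   ("video", ["premiere", "video", "youtube"])]

def procKeywords : List String :=
  ["canva", "code", "visual studio", "word", "powerpoint", "outlook",
   "thunderbird", "chrome", "firefox", "edge", "premiere", "vegas", "video"]

def procRules : List (String × List String) :=
  [("canva", ["canva"]),
   ("code", ["code", "visual studio"]),
   ("document", ["word"]),
   ("presentation", ["powerpoint"]),
   ("email", ["outlook", "thunderbird"]),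
   ("browser", ["chrome", "firefox", "edge"]),
   ("video", ["premiere", "vegas", "video"])]

-- _scan: one pass over the text; 'text.startswith(kw, i)' for nonnegative i is ported
-- exactly as Chars.startswith on (text.drop i)
def scanHits (text : List Char) (keywords : List String) : PySem.Set String :=
  (PySem.List.pyRange 0 text.length 1).foldl
    (fun hits i =>
      keywords.foldl
        (fun hits kw =>
          if !(PySem.Set.contains hits kw)
             && PySem.Chars.startswith (text.drop i.toNat) kw.toList
          then PySem.Set.add hits kw else hits)
        hits)
    PySem.Set.empty

-- 'for category, keys in RULES: if hits & keys: return category' — the truthiness of the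
-- set intersection is ported as 'keys.any (hits.contains ·)' (exact: both mean a
-- nonempty intersection)
def ruleLoop (hits : PySem.Set String) : List (String × List String) → Option String
  | [] => none
  | (cat, keys) :: rest =>
    if keys.any (fun k => PySem.Set.contains hits k) then some cat else ruleLoop hits rest

-- 'for process in processes' loop of B
def bProcLoop : List String → String
  | [] => "default"
  | p :: rest =>
    match ruleLoop (scanHits (PySem.Str.lower p).toList procKeywords) procRules with
    | some c => c
    | none => bProcLoop rest

def get_context_category_alt (window_title : String) (processes : List String) : String :=
  let hits := scanHits (PySem.Str.lower window_title).toList titleKeywords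
  let hits := if processes.any (fun p => PySem.Str.lower p == "code.exe")
              then PySem.Set.add hits "code.exe" else hits
  match ruleLoop hits titleRules with
  | some c => c
  | none => bProcLoop processes

-- ===== PRECONDITION & SPEC =====
def Spec_get_context_category (window_title : String) (processes : List String) (out : String) : Prop := out = get_context_category_alt window_title processes
instance (window_title : String) (processes : List String) (out : String) : Decidable (Spec_get_context_category window_title processes out) := by unfold Spec_get_context_category; infer_instance

-- ===== CLAIM (what is proved, stated in full; the proofs are below) =====
def Claim_equal_get_context_category : Prop := ∀ (window_title : String) (processes : List String), Dom_get_context_category window_title processes → Spec_get_context_category window_title processes (get_context_category window_title processes)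

-- ===== LEMMAS AND PROOFS =====

-- membership after the inner keyword fold at one position
theorem mem_innerFold (text : List Char) (i : Int) (kws : List String) (hits : PySem.Set String) (kw : String) :
    kw ∈ kws.foldl
        (fun hits kw' =>
          if !(PySem.Set.contains hits kw')
             && PySem.Chars.startswith (text.drop i.toNat) kw'.toList
          then PySem.Set.add hits kw' else hits) hits
    ↔ kw ∈ hits ∨ (kw ∈ kws ∧ PySem.Chars.startswith (text.drop i.toNat) kw.toList = true) := by
  induction kws generalizing hits with
  | nil => simp
  | cons k rest ih =>
    simp only [List.foldl_cons, List.mem_cons]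
    by_cases hm : k ∈ hits
    · have hc : PySem.Set.contains hits k = true := (PySem.Set.contains_iff hits k).mpr hm
      have hcond : (!(PySem.Set.contains hits k)
          && PySem.Chars.startswith (text.drop i.toNat) k.toList) = false := by rw [hc]; rfl
      rw [hcond]
      simp only [Bool.false_eq_true, if_false]
      rw [ih]
      by_cases hkk : kw = k
      · subst hkk; simp [hm]
      · simp [hkk]
    · have hc : PySem.Set.contains hits k = false :=
        Bool.eq_false_iff.mpr (fun h => hm ((PySem.Set.contains_iff hits k).mp h))
      by_cases hs : PySem.Chars.startswith (text.drop i.toNat) k.toList = true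
      · have hcond : (!(PySem.Set.contains hits k)
            && PySem.Chars.startswith (text.drop i.toNat) k.toList) = true := by rw [hc, hs]; rfl
        rw [hcond]
        simp only [if_true]
        rw [ih]
        simp only [PySem.Set.mem_add]
        by_cases hkk : kw = k
        · subst hkk; simp [hs]
          try tauto
        · simp [hkk]
          try tauto
      · have hsf : PySem.Chars.startswith (text.drop i.toNat) k.toList = false :=
          Bool.eq_false_iff.mpr hs
        have hcond : (!(PySem.Set.contains hits k)
            && PySem.Chars.startswith (text.drop i.toNat) k.toList) = false := by rw [hc, hsf]; rfl
        rw [hcond]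
        simp only [Bool.false_eq_true, if_false]
        rw [ih]
        by_cases hkk : kw = k
        · subst hkk; simp [hsf]
        · simp [hkk]

-- membership in the whole scan: the keyword occurs somewhere in the text (kw ≠ "")
theorem mem_scanHits (text : List Char) (kws : List String) (kw : String) (hne : kw.toList ≠ []) :
    kw ∈ scanHits text kws
    ↔ kw ∈ kws ∧ PySem.Chars.isIn kw.toList text = true := by
  unfold scanHits
  have main : ∀ (r : List Int) (hits : PySem.Set String),
      kw ∈ r.foldl
          (fun hits i =>
            kws.foldl
              (fun hits kw' =>
                if !(PySem.Set.contains hits kw')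
                   && PySem.Chars.startswith (text.drop i.toNat) kw'.toList
                then PySem.Set.add hits kw' else hits) hits) hits
      ↔ kw ∈ hits ∨ (kw ∈ kws ∧ ∃ i ∈ r, PySem.Chars.startswith (text.drop i.toNat) kw.toList = true) := by
    intro r
    induction r with
    | nil => simp
    | cons i rest ih =>
      intro hits
      simp only [List.foldl_cons, ih, mem_innerFold, List.mem_cons]
      constructor
      · rintro ((h1 | ⟨hk, hsw⟩) | ⟨hk, j, hj, hsw⟩)
        · exact Or.inl h1
        · exact Or.inr ⟨hk, i, Or.inl rfl, hsw⟩
        · exact Or.inr ⟨hk, j, Or.inr hj, hsw⟩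
      · rintro (h1 | ⟨hk, j, rfl | hj, hsw⟩)
        · exact Or.inl (Or.inl h1)
        · exact Or.inl (Or.inr ⟨hk, hsw⟩)
        · exact Or.inr ⟨hk, j, hj, hsw⟩
  rw [main]
  simp only [PySem.Set.empty, List.not_mem_nil, false_or]
  constructor
  · rintro ⟨hk, i, _, hsw⟩
    refine ⟨hk, ?_⟩
    rw [← PySem.Chars.exists_prefix_drop_iff_isIn]
    exact ⟨i.toNat, (PySem.Chars.startswith_iff _ _).mp hsw⟩
  · rintro ⟨hk, hin⟩
    refine ⟨hk, ?_⟩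
    obtain ⟨j, hpre⟩ := (PySem.Chars.exists_prefix_drop_iff_isIn _ _).mpr hin
    have hjlt : j < text.length := by
      by_contra hge
      push_neg at hge
      rw [List.drop_eq_nil_of_le hge] at hpre
      exact hne (List.prefix_nil.mp hpre)
    refine ⟨(j : Int), ?_, ?_⟩
    · rw [PySem.List.mem_pyRange_one]; omega
    · rw [PySem.Chars.startswith_iff]; simpa using hpre

-- the same, as a Bool rewriting equation on Set.contains
theorem contains_scanHits (text : List Char) (kws : List String) (kw : String) (hne : kw.toList ≠ []) :
    PySem.Set.contains (scanHits text kws) kw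
      = (kws.contains kw && PySem.Chars.isIn kw.toList text) := by
  rw [Bool.eq_iff_iff, PySem.Set.contains_iff, mem_scanHits text kws kw hne]
  simp

-- specialization used by the rewrites below: the keyword is in the table
theorem contains_scanHits' (text : List Char) (kws : List String) (kw : String)
    (hne : kw.toList ≠ []) (hmem : kws.contains kw = true) :
    PySem.Set.contains (scanHits text kws) kw = PySem.Chars.isIn kw.toList text := by
  rw [contains_scanHits text kws kw hne, hmem, Bool.true_and]

-- flattening 'match (if c then some x else r) with …' into an ite chain
theorem match_ite (c : Prop) [Decidable c] (x : String) (r : Option String) (d : String) :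
    (match (if c then some x else r) with | some y => y | none => d)
      = if c then x else (match r with | some y => y | none => d) := by
  split_ifs <;> rfl

-- contains through the optional 'hits.add "code.exe"' step, other keyword
theorem contains_ite_add_ne (c : Bool) (hits : PySem.Set String) (x kw : String) (hne : kw ≠ x) :
    PySem.Set.contains (if c = true then PySem.Set.add hits x else hits) kw
      = PySem.Set.contains hits kw := by
  split_ifs with h
  · rw [Bool.eq_iff_iff, PySem.Set.contains_iff, PySem.Set.contains_iff, PySem.Set.mem_add]
    simp [hne]
  · rfl

-- contains through the optional 'hits.add "code.exe"' step, the added keyword itself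
theorem contains_ite_add_self (c : Bool) (hits : PySem.Set String) (x : String) (hx : x ∉ hits) :
    PySem.Set.contains (if c = true then PySem.Set.add hits x else hits) x = c := by
  cases c with
  | false =>
    simp only [Bool.false_eq_true, if_false]
    exact Bool.eq_false_iff.mpr (fun h => hx ((PySem.Set.contains_iff hits x).mp h))
  | true =>
    simp only [if_true]
    exact (PySem.Set.contains_iff _ x).mpr ((PySem.Set.mem_add hits x x).mpr (Or.inr rfl))

-- 'code.exe' membership: A's contains on the mapped list vs B's any
theorem codeexe_eq (ps : List String) :
    (ps.map (fun p => PySem.Str.lower p)).contains "code.exe"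
      = ps.any (fun p => PySem.Str.lower p == "code.exe") := by
  induction ps with
  | nil => rfl
  | cons p rest ih =>
    simp only [List.map_cons, List.contains_cons, List.any_cons, ih]
    by_cases h : PySem.Str.lower p = "code.exe"
    · simp [h]
    · simp [beq_eq_false_iff_ne.mpr h, beq_eq_false_iff_ne.mpr (Ne.symm h)]

-- B's per-process scan + rule loop is A's if/elif chain on that process
theorem procLoop_eq (ps : List String) : aProcLoop ps = bProcLoop ps := by
  induction ps with
  | nil => rfl
  | cons p rest ih =>
    show aProcLoop (p :: rest) = bProcLoop (p :: rest)
    rw [bProcLoop]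
    simp only [ruleLoop, procRules, List.any_cons, List.any_nil, Bool.or_false]
    rw [contains_scanHits' _ _ "canva" (by decide) (by decide),
        contains_scanHits' _ _ "code" (by decide) (by decide),
        contains_scanHits' _ _ "visual studio" (by decide) (by decide),
        contains_scanHits' _ _ "word" (by decide) (by decide),
        contains_scanHits' _ _ "powerpoint" (by decide) (by decide),
        contains_scanHits' _ _ "outlook" (by decide) (by decide),
        contains_scanHits' _ _ "thunderbird" (by decide) (by decide),
        contains_scanHits' _ _ "chrome" (by decide) (by decide),
        contains_scanHits' _ _ "firefox" (by decide) (by decide),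
        contains_scanHits' _ _ "edge" (by decide) (by decide),
        contains_scanHits' _ _ "premiere" (by decide) (by decide),
        contains_scanHits' _ _ "vegas" (by decide) (by decide),
        contains_scanHits' _ _ "video" (by decide) (by decide)]
    simp only [aProcLoop,
      show ∀ sub s : String, PySem.Str.isIn sub s = PySem.Chars.isIn sub.toList s.toList from
        by simp [pysem],
      ih, match_ite, Bool.or_assoc]

-- B's title scan + rule loop is A's title if/elif chain
theorem title_eq (wt : String) (ps : List String) :
    get_context_category wt ps = get_context_category_alt wt ps := by
  simp only [get_context_category, get_context_category_alt]
  simp only [ruleLoop, titleRules, List.any_cons, List.any_nil, Bool.or_false]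
  rw [contains_ite_add_ne _ _ _ "gmail" (by decide), contains_ite_add_ne _ _ _ "mail.google" (by decide),
      contains_ite_add_ne _ _ _ "docs.google" (by decide), contains_ite_add_ne _ _ _ "slides.google" (by decide),
      contains_ite_add_ne _ _ _ "sheets.google" (by decide), contains_ite_add_ne _ _ _ "youtube" (by decide),
      contains_ite_add_ne _ _ _ "canva" (by decide), contains_ite_add_ne _ _ _ "visual studio code" (by decide),
      contains_ite_add_ne _ _ _ "vs code" (by decide), contains_ite_add_ne _ _ _ "word" (by decide),
      contains_ite_add_ne _ _ _ "document" (by decide), contains_ite_add_ne _ _ _ ".doc" (by decide),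
      contains_ite_add_ne _ _ _ "powerpoint" (by decide), contains_ite_add_ne _ _ _ "presentation" (by decide),
      contains_ite_add_ne _ _ _ ".ppt" (by decide), contains_ite_add_ne _ _ _ "outlook" (by decide),
      contains_ite_add_ne _ _ _ "mail" (by decide), contains_ite_add_ne _ _ _ "chrome" (by decide),
      contains_ite_add_ne _ _ _ "edge" (by decide), contains_ite_add_ne _ _ _ "firefox" (by decide),
      contains_ite_add_ne _ _ _ "browser" (by decide), contains_ite_add_ne _ _ _ "premiere" (by decide),
      contains_ite_add_ne _ _ _ "video" (by decide),
      contains_ite_add_self _ _ "code.exe"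
        (fun hm => absurd
          ((mem_scanHits (PySem.Str.lower wt).toList titleKeywords "code.exe" (by decide)).mp hm).1
          (by decide))]
  rw [contains_scanHits' _ _ "gmail" (by decide) (by decide),
      contains_scanHits' _ _ "mail.google" (by decide) (by decide),
      contains_scanHits' _ _ "docs.google" (by decide) (by decide),
      contains_scanHits' _ _ "slides.google" (by decide) (by decide),
      contains_scanHits' _ _ "sheets.google" (by decide) (by decide),
      contains_scanHits' _ _ "youtube" (by decide) (by decide),
      contains_scanHits' _ _ "canva" (by decide) (by decide),
      contains_scanHits' _ _ "visual studio code" (by decide) (by decide),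
      contains_scanHits' _ _ "vs code" (by decide) (by decide),
      contains_scanHits' _ _ "word" (by decide) (by decide),
      contains_scanHits' _ _ "document" (by decide) (by decide),
      contains_scanHits' _ _ ".doc" (by decide) (by decide),
      contains_scanHits' _ _ "powerpoint" (by decide) (by decide),
      contains_scanHits' _ _ "presentation" (by decide) (by decide),
      contains_scanHits' _ _ ".ppt" (by decide) (by decide),
      contains_scanHits' _ _ "outlook" (by decide) (by decide),
      contains_scanHits' _ _ "mail" (by decide) (by decide),
      contains_scanHits' _ _ "chrome" (by decide) (by decide),
      contains_scanHits' _ _ "edge" (by decide) (by decide),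
      contains_scanHits' _ _ "firefox" (by decide) (by decide),
      contains_scanHits' _ _ "browser" (by decide) (by decide),
      contains_scanHits' _ _ "premiere" (by decide) (by decide),
      contains_scanHits' _ _ "video" (by decide) (by decide),
      codeexe_eq]
  simp only [show ∀ sub s : String, PySem.Str.isIn sub s = PySem.Chars.isIn sub.toList s.toList from
      by simp [pysem],
    procLoop_eq, match_ite, Bool.or_assoc]

-- ===== VERDICT (by name: the statement is the Claim_ definition above) =====
theorem get_context_category_spec : Claim_equal_get_context_category := by
  intro wt ps _
  exact title_eq wt ps
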